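-- pv_equiv track=rewrite | github.com/maze-agent/Maze | maze/client/front/workflow.py | _looks_like_file_path
-- ===== SOURCE A (Python) =====
-- def _looks_like_file_path(value: str) -> bool:
--     """
--     启发式判断字符串是否是文件路径（内部方法）
--     """
--     # 检查是否包含常见文件扩展名
--     common_extensions = ['.jpg', '.jpeg', '.png', '.gif', '.bmp', '.webp',  # 图片
--                         '.mp3', '.wav', '.ogg', '.flac', '.m4a',  # 音频
--                         '.mp4', '.avi', '.mov', '.mkv',  # 视频
--                         '.txt', '.pdf', '.doc', '.docx',  # 文档
--                         '.zip', '.tar', '.gz']  # 压缩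
--
--     value_lower = value.lower()
--     return any(value_lower.endswith(ext) for ext in common_extensions)
-- ===== SOURCE B (Python) =====
-- _EXTENSION_NAMES = frozenset([
--     'jpg', 'jpeg', 'png', 'gif', 'bmp', 'webp',   # images
--     'mp3', 'wav', 'ogg', 'flac', 'm4a',           # audio
--     'mp4', 'avi', 'mov', 'mkv',                   # video
--     'txt', 'pdf', 'doc', 'docx',                  # documents
--     'zip', 'tar', 'gz',                           # archives
-- ])
--
--
-- def _looks_like_file_path(value: str) -> bool:
--     """
--     启发式判断字符串是否是文件路径（内部方法）
--     """
--     _head, sep, tail = value.lower().rpartition('.')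
--     return sep == '.' and tail in _EXTENSION_NAMES
-- ===== Notes on version B (the rewrite author's own statement) =====
-- stated objective: idiomatic
-- what changed: Instead of scanning the 22-element extension list with repeated endswith tests, B lowercases once, splits off the segment after the last dot with rpartition('.'), and does a single membership test against a frozenset of extension names.
import Mathlib
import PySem

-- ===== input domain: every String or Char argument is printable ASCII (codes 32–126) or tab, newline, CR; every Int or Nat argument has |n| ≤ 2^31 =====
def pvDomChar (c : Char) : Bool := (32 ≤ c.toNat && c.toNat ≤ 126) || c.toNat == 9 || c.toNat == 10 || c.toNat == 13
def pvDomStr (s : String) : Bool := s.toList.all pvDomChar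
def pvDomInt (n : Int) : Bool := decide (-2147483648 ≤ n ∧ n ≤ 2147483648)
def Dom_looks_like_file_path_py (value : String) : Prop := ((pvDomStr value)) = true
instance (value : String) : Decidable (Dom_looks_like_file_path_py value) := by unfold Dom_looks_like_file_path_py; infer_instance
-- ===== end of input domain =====

-- B replaces the 22 repeated endswith tests by one rpartition('.') split plus a single
-- frozenset membership test of the final extension segment (idiomatic; same result).
-- (String constants are ported as char lists, per the PySem List Char convention.)


-- ===== PORT A =====
def commonExtensions : List (List Char) :=
  [['.','j','p','g'], ['.','j','p','e','g'], ['.','p','n','g'], ['.','g','i','f'],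
   ['.','b','m','p'], ['.','w','e','b','p'],
   ['.','m','p','3'], ['.','w','a','v'], ['.','o','g','g'], ['.','f','l','a','c'], ['.','m','4','a'],
   ['.','m','p','4'], ['.','a','v','i'], ['.','m','o','v'], ['.','m','k','v'],
   ['.','t','x','t'], ['.','p','d','f'], ['.','d','o','c'], ['.','d','o','c','x'],
   ['.','z','i','p'], ['.','t','a','r'], ['.','g','z']]

def looks_like_file_path_py (value : String) : Bool :=
  let value_lower := (PySem.Str.lower value).toList
  commonExtensions.any (fun ext => PySem.Chars.endswith value_lower ext)

-- ===== PORT B =====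
-- the frozenset of extension names (without the dot)
def extensionNames : List (List Char) :=
  PySem.Set.ofList
    [['j','p','g'], ['j','p','e','g'], ['p','n','g'], ['g','i','f'],
     ['b','m','p'], ['w','e','b','p'],
     ['m','p','3'], ['w','a','v'], ['o','g','g'], ['f','l','a','c'], ['m','4','a'],
     ['m','p','4'], ['a','v','i'], ['m','o','v'], ['m','k','v'],
     ['t','x','t'], ['p','d','f'], ['d','o','c'], ['d','o','c','x'],
     ['z','i','p'], ['t','a','r'], ['g','z']]

-- hand port of str.rpartition('.') restricted to what B uses: `sep == '.'` holds iff a '.'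
-- occurs, and then `tail` is the segment after the LAST '.' (exact for a 1-char separator)
def looks_like_file_path_py_alt (value : String) : Bool :=
  let l := (PySem.Str.lower value).toList
  if l.contains '.' then
    extensionNames.contains ((l.reverse.takeWhile (· ≠ '.')).reverse)
  else
    false

-- ===== PRECONDITION & SPEC =====
def Spec_looks_like_file_path_py (value : String) (out : Bool) : Prop := out = looks_like_file_path_py_alt value
instance (value : String) (out : Bool) : Decidable (Spec_looks_like_file_path_py value out) := by unfold Spec_looks_like_file_path_py; infer_instance

-- ===== CLAIM (what is proved, stated in full; the proofs are below) =====
def Claim_equal_looks_like_file_path_py : Prop := ∀ (value : String), Dom_looks_like_file_path_py value → Spec_looks_like_file_path_py value (looks_like_file_path_py value)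

-- ===== LEMMAS AND PROOFS =====

-- a dot-free block followed by '.' is a prefix of r iff r contains '.' and its maximal
-- leading dot-free block is exactly that block
theorem prefix_dot_iff (p r : List Char) (hp : ∀ c ∈ p, c ≠ '.') :
    (p ++ ['.']) <+: r ↔ ('.' ∈ r ∧ r.takeWhile (· ≠ '.') = p) := by
  constructor
  · rintro ⟨t, ht⟩
    have hr : r = p ++ '.' :: t := by simpa using ht.symm
    subst hr
    constructor
    · simp
    · induction p with
      | nil => simp
      | cons c p ih =>
        have hc : c ≠ '.' := hp c (by simp)
        simp only [List.cons_append, List.takeWhile_cons, decide_eq_true_eq]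
        rw [if_pos hc]
        simpa using ih (fun x hx => hp x (by simp [hx]))
  · rintro ⟨hmem, htw⟩
    have hsplit := (List.takeWhile_append_dropWhile (p := (· ≠ '.')) (l := r)).symm
    have hne : r.dropWhile (· ≠ '.') ≠ [] := by
      intro hnil
      have hall := List.dropWhile_eq_nil_iff.mp hnil
      have := hall '.' hmem
      simp at this
    obtain ⟨d, ds, hds⟩ := List.exists_cons_of_ne_nil hne
    have hd : d = '.' := by
      have := List.head_dropWhile_not (p := (· ≠ '.')) (l := r) hne
      simp only [hds, List.head_cons] at this
      simpa using this
    exact ⟨ds, by rw [hsplit, htw, hds, hd]; simp⟩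

-- endswith with a '.'-prefixed dot-free extension, in terms of the segment after the last dot
theorem endswith_dot (l e : List Char) (he : ∀ c ∈ e, c ≠ '.') :
    PySem.Chars.endswith l ('.' :: e)
      = (l.contains '.' && decide ((l.reverse.takeWhile (· ≠ '.')).reverse = e)) := by
  rw [Bool.eq_iff_iff, PySem.Chars.endswith_iff, ← List.reverse_prefix]
  rw [show ('.' :: e).reverse = e.reverse ++ ['.'] from by simp]
  rw [prefix_dot_iff _ _ (fun c hc => he c (List.mem_reverse.mp hc))]
  simp only [Bool.and_eq_true, decide_eq_true_eq, List.contains_iff_mem, List.mem_reverse]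
  constructor
  · rintro ⟨h1, h2⟩
    exact ⟨h1, by rw [h2]; simp⟩
  · rintro ⟨h1, h2⟩
    exact ⟨h1, by rw [← h2]; simp⟩

theorem any_congr_mem {α : Type} (L : List α) (f g : α → Bool) (h : ∀ x ∈ L, f x = g x) :
    L.any f = L.any g := by
  induction L with
  | nil => rfl
  | cons a L ih =>
    simp only [List.any_cons, h a (by simp), ih (fun x hx => h x (by simp [hx]))]

theorem any_and_left {α : Type} (c : Bool) (p : α → Bool) (L : List α) :
    L.any (fun x => c && p x) = (c && L.any p) := by
  induction L with
  | nil => cases c <;> rfl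
  | cons a L ih => cases c <;> simp_all

theorem any_eq_contains (t : List Char) (L : List (List Char)) :
    L.any (fun e => decide ((t : List Char) = e)) = L.contains t := by
  induction L with
  | nil => rfl
  | cons a L ih =>
    simp only [List.any_cons, List.contains_cons, ih]
    congr 1
    rw [Bool.eq_iff_iff]
    simp only [decide_eq_true_eq, beq_iff_eq]
    try first | exact Iff.rfl | exact eq_comm

theorem extNames_lit : extensionNames =
    [['j','p','g'], ['j','p','e','g'], ['p','n','g'], ['g','i','f'],
     ['b','m','p'], ['w','e','b','p'],
     ['m','p','3'], ['w','a','v'], ['o','g','g'], ['f','l','a','c'], ['m','4','a'],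
     ['m','p','4'], ['a','v','i'], ['m','o','v'], ['m','k','v'],
     ['t','x','t'], ['p','d','f'], ['d','o','c'], ['d','o','c','x'],
     ['z','i','p'], ['t','a','r'], ['g','z']] := by
  unfold extensionNames
  apply PySem.Set.ofList_eq_self_of_nodup
  decide

theorem extensionNames_dotfree : ∀ e ∈ extensionNames, ∀ c ∈ e, c ≠ '.' := by
  have hb : extensionNames.all (fun e => e.all (fun c => c != '.')) = true := by
    rw [extNames_lit]; rfl
  intro e he c hc
  have h1 := List.all_eq_true.mp hb e he
  have h2 := List.all_eq_true.mp h1 c hc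
  simpa using h2

theorem ext_map_eq : commonExtensions = extensionNames.map ('.' :: ·) := by
  rw [extNames_lit]; rfl

-- ===== VERDICT (by name: the statement is the Claim_ definition above) =====
theorem looks_like_file_path_py_spec : Claim_equal_looks_like_file_path_py := by
  intro value _
  unfold Spec_looks_like_file_path_py looks_like_file_path_py looks_like_file_path_py_alt
  generalize (PySem.Str.lower value).toList = l
  rw [ext_map_eq, List.any_map]
  simp only [Function.comp_def]
  rw [any_congr_mem _ _ _ (fun e he =>
        endswith_dot l e (extensionNames_dotfree e he)),
      any_and_left, any_eq_contains]
  cases l.contains '.' <;> simp
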